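-- pv_equiv track=rewrite | github.com/hannabri/fine_tune_mbert | pre_treatment.py | add_pad
-- ===== SOURCE A (Python) =====
-- def add_pad(pos, offset):
--     # add <pad> token to the PoS
--     # input: list of PoS and offset returned by mBERT tokenizer
--
--     padding_length = len(offset[0])
--     padded_pos = []
--
--     for s in range(len(offset)):
--         for t in range(len(offset[s])):
--
--             # if the tuple starts not with 0 or ends with 0
--             if (offset[s][t][0] != 0) or (offset[s][t][1] == 0):
--                 pos[s].insert(t, "<pad>")
--
--         # adding only the first padding_length elements --> padding
--         padded_pos.append(pos[s][:padding_length])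
--
--     return padded_pos
-- ===== SOURCE B (Python) =====
-- def add_pad(pos, offset):
--     # Single forward pass per sentence with a pointer into the original PoS
--     # list, instead of mutating the list with repeated list.insert.
--     # Note: unlike A, this does not mutate pos in place.
--     padding_length = len(offset[0])
--     padded_pos = []
--     for off_s, pos_s in zip(offset, pos):
--         out = []
--         i = 0
--         for o in off_s:
--             if o[0] != 0 or o[1] == 0:
--                 out.append("<pad>")
--             elif i < len(pos_s):
--                 out.append(pos_s[i])
--                 i += 1
--         out.extend(pos_s[i:])
--         padded_pos.append(out[:padding_length])
--     return padded_pos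
-- ===== Notes on version B (the rewrite author's own statement) =====
-- stated objective: alternative
-- what changed: Each sentence is rebuilt in one forward pass that emits '<pad>' or the next original tag via a pointer into the original list, instead of A's index-loop that mutates pos[s] with repeated list.insert calls.
import Mathlib
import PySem

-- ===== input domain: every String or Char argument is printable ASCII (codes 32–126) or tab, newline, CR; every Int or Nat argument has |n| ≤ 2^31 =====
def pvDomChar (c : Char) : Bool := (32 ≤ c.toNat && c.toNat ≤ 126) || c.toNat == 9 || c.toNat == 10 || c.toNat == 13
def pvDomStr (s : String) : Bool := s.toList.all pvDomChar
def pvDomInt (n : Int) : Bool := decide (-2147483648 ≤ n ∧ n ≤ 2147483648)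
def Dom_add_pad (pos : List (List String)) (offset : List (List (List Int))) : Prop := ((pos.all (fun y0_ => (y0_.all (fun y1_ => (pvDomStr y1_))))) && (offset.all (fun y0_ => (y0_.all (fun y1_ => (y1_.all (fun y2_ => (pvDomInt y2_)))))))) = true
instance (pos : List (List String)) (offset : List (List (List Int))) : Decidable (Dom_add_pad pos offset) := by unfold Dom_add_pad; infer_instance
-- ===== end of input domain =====

-- B rebuilds each padded sentence in one forward pass (pointer into the original tags)
-- instead of A's repeated list.insert; equivalence is about the RETURN value only
-- (the Python A mutates `pos` in place, B does not).


-- ===== PORT A =====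
-- The pad condition `(o[0] != 0) or (o[1] == 0)` with short-circuit `or`, written
-- identically in A and Source B, so shared by both ports. The `none` branches are
-- IndexError (pair shorter than the indices read); excluded by Pre_.
def padCond (o : List Int) : Bool :=
  match PySem.List.pyGet? o 0 with
  | none => false
  | some a =>
    if a ≠ 0 then true
    else
      match PySem.List.pyGet? o 1 with
      | none => false
      | some b => b == 0

-- one step of the inner `for t in range(len(offset[s]))` loop: pos[s].insert(t, "<pad>")
def stepInnerA (cur : List String) (ti : Int × List Int) : List String :=
  if padCond ti.2 then PySem.List.insert cur ti.1 "<pad>" else cur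

-- one step of the outer `for s in range(len(offset))` loop; the state is (pos, padded_pos).
-- `pyGet? … |>.getD []` : pos[s]; `none` is IndexError (len(pos) ≤ s), excluded by Pre_.
def stepOuterA (pl : Int) (st : List (List String) × List (List String))
    (so : Int × List (List Int)) : List (List String) × List (List String) :=
  let posS := (PySem.List.pyGet? st.1 so.1).getD []
  let posS' := (PySem.List.enumerate so.2 0).foldl stepInnerA posS
  (PySem.List.pySetD st.1 so.1 posS', st.2 ++ [PySem.List.slice posS' none (some pl)])

def add_pad (pos : List (List String)) (offset : List (List (List Int))) : List (List String) :=
  -- len(offset[0]): `.getD []` stands for the IndexError on offset = [], excluded by Pre_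
  let padding_length : Int := PySem.List.len ((PySem.List.pyGet? offset 0).getD [])
  ((PySem.List.enumerate offset 0).foldl (stepOuterA padding_length) (pos, [])).2

-- ===== PORT B =====
-- Source B's single pass: `rest` is pos_s[i:] (the not-yet-consumed original tags);
-- the [] base case is `out.extend(pos_s[i:])`.
def bInner : List (List Int) → List String → List String
  | [], rest => rest
  | o :: os, rest =>
    if padCond o then "<pad>" :: bInner os rest
    else
      match rest with
      | [] => bInner os []
      | r :: rs => r :: bInner os rs

def add_pad_alt (pos : List (List String)) (offset : List (List (List Int))) : List (List String) :=
  let padding_length : Int := PySem.List.len ((PySem.List.pyGet? offset 0).getD [])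
  (offset.zip pos).map (fun p => PySem.List.slice (bInner p.1 p.2) none (some padding_length))

-- ===== PRECONDITION & SPEC =====
-- Exactly the inputs on which the Python A returns: offset non-empty (len(offset[0])),
-- pos at least as long as offset (pos[s] is read for every s), and every offset pair long
-- enough for the short-circuit condition (index 0 always read; index 1 read only when o[0] == 0).
def Pre_add_pad (pos : List (List String)) (offset : List (List (List Int))) : Prop :=
  offset ≠ [] ∧ offset.length ≤ pos.length ∧
    ∀ offS ∈ offset, ∀ o ∈ offS, o ≠ [] ∧ (o.headI ≠ 0 ∨ 2 ≤ o.length)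
instance (pos : List (List String)) (offset : List (List (List Int))) : Decidable (Pre_add_pad pos offset) := by unfold Pre_add_pad; infer_instance

def pvWitness_add_pad : List (List String) × List (List (List Int)) :=
  ([["DET", "NOUN", "VERB"]], [[[0, 0], [0, 2], [2, 3], [0, 1], [0, 0]]])

def Spec_add_pad (pos : List (List String)) (offset : List (List (List Int))) (out : List (List String)) : Prop := out = add_pad_alt pos offset
instance (pos : List (List String)) (offset : List (List (List Int))) (out : List (List String)) : Decidable (Spec_add_pad pos offset out) := by unfold Spec_add_pad; infer_instance

-- ===== CLAIM (what is proved, stated in full; the proofs are below) =====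
def Claim_equal_add_pad : Prop := ∀ (pos : List (List String)) (offset : List (List (List Int))), Dom_add_pad pos offset → Pre_add_pad pos offset → Spec_add_pad pos offset (add_pad pos offset)

-- ===== LEMMAS AND PROOFS =====

-- Python's list.insert clamps a past-the-end position to the end.
theorem insert_of_length_le {α : Type} (xs : List α) (v : α) (k : Nat) (h : xs.length ≤ k) :
    PySem.List.insert xs (k : Int) v = xs ++ [v] := by
  simp [PySem.List.insert, PySem.List.sliceIndices]
  rw [if_neg (by omega), min_eq_right (by exact_mod_cast h)]
  simp [List.take_of_length_le (le_refl _), List.drop_of_length_le (le_refl _)]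

-- The inner-loop invariant: A's fold of inserts at index t over `out ++ rest` equals
-- `out ++` B's single pass, as long as out has length t (or the originals are exhausted).
theorem inner_eq (off : List (List Int)) :
    ∀ (k : Nat) (out rest : List String), (out.length = k ∨ rest = []) → out.length ≤ k →
    (PySem.List.enumerate off (k : Int)).foldl stepInnerA (out ++ rest) = out ++ bInner off rest := by
  induction off with
  | nil => intro k out rest _ _; simp [PySem.List.enumerate_nil, bInner]
  | cons o os ih =>
    intro k out rest hor hle
    rw [PySem.List.enumerate_cons, List.foldl_cons]
    by_cases hc : padCond o = true
    · have hstep : stepInnerA (out ++ rest) ((k : Int), o)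
          = (out ++ ["<pad>"]) ++ rest := by
        rcases hor with h | h
        · simp only [stepInnerA, hc]
          rw [← h, PySem.List.insert_natCast _ _ _ (by simp), List.take_left, List.drop_left]
          simp
        · subst h
          simp only [stepInnerA, hc, List.append_nil]
          rw [insert_of_length_le _ _ _ hle]
          simp
      rw [hstep]
      have : ((k : Int) + 1) = ((k + 1 : Nat) : Int) := by push_cast; ring
      rw [this, ih (k + 1) (out ++ ["<pad>"]) rest
        (by rcases hor with h | h; exacts [Or.inl (by simp [h]), Or.inr h])
        (by simp; omega)]
      simp [bInner, hc]
    · have hstep : stepInnerA (out ++ rest) ((k : Int), o) = out ++ rest := by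
        simp [stepInnerA, hc]
      rw [hstep]
      have hk1 : ((k : Int) + 1) = ((k + 1 : Nat) : Int) := by push_cast; ring
      rcases rest with _ | ⟨r, rs⟩
      · rw [hk1, ih (k + 1) out []
          (by right; rfl) (by omega)]
        simp [bInner, hc]
      · have hlen : out.length = k := by
          rcases hor with h | h
          · exact h
          · exact absurd h (by simp)
        have : out ++ r :: rs = (out ++ [r]) ++ rs := by simp
        rw [this, hk1, ih (k + 1) (out ++ [r]) rs
          (by left; simp [hlen]) (by simp; omega)]
        simp [bInner, hc]

-- pos[s] = v  for an in-range Nat index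
theorem pySetD_natCast {α : Type} (xs : List α) (k : Nat) (v : α) (h : k < xs.length) :
    PySem.List.pySetD xs (k : Int) v = xs.set k v := by
  simp [PySem.List.pySetD, PySem.List.pySet?, PySem.List.pyIdx?, h]

-- The outer-loop invariant: folding A's per-sentence step from index k over a pos-state P
-- appends exactly B's per-sentence results zipped against the untouched suffix of P.
theorem outer_eq (pl : Int) (off : List (List (List Int))) :
    ∀ (k : Nat) (P : List (List String)) (acc : List (List String)),
    off.length + k ≤ P.length →
    ((PySem.List.enumerate off (k : Int)).foldl (stepOuterA pl) (P, acc)).2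
      = acc ++ (off.zip (P.drop k)).map
          (fun p => PySem.List.slice (bInner p.1 p.2) none (some pl)) := by
  induction off with
  | nil => intro k P acc _; simp [PySem.List.enumerate_nil]
  | cons o os ih =>
    intro k P acc hlen
    have hk : k < P.length := by simp at hlen; omega
    rw [PySem.List.enumerate_cons, List.foldl_cons]
    have hget : (PySem.List.pyGet? P (k : Int)).getD [] = P[k] := by
      rw [PySem.List.pyGet?_natCast, List.getElem?_eq_getElem hk]
      rfl
    have hinner : (PySem.List.enumerate o 0).foldl stepInnerA P[k] = bInner o P[k] := by
      have := inner_eq o 0 [] P[k] (Or.inl rfl) (by simp)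
      simpa using this
    have hstep : stepOuterA pl (P, acc) ((k : Int), o)
        = (P.set k (bInner o P[k]),
           acc ++ [PySem.List.slice (bInner o P[k]) none (some pl)]) := by
      simp only [stepOuterA, hget, hinner]
      rw [pySetD_natCast _ _ _ hk]
    rw [hstep]
    have hk1 : ((k : Int) + 1) = ((k + 1 : Nat) : Int) := by push_cast; ring
    rw [hk1, ih (k + 1) (P.set k (bInner o P[k])) _ (by simp at hlen ⊢; omega)]
    have hdrop1 : (P.set k (bInner o P[k])).drop (k + 1) = P.drop (k + 1) := by
      rw [List.drop_set]
      simp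
    have hdrop0 : P.drop k = P[k] :: P.drop (k + 1) := List.drop_eq_getElem_cons hk
    rw [hdrop0, List.zip_cons_cons, List.map_cons, hdrop1]
    simp

-- ===== VERDICT (by name: the statement is the Claim_ definition above) =====
theorem add_pad_spec : Claim_equal_add_pad := by
  intro pos offset _ hpre
  unfold Spec_add_pad add_pad add_pad_alt
  have h0 : ((0 : Int)) = ((0 : Nat) : Int) := rfl
  rw [h0, outer_eq _ offset 0 pos [] (by simpa using hpre.2.1)]
  simp
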